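-- pv_equiv track=rewrite | github.com/PeterJensen/aquaq | solve-38.py | isComfortable
-- ===== SOURCE A (Python) =====
-- def isComfy(numbers):
--   return sum(numbers) % len(numbers) == 0
--
-- def isComfortable(numbers, i, l):
--   nl = len(numbers)
--   if l == 1:
--     return True
--   si = max(0, i - l + 1)
--   for s in range(si, i+1):
--     sr = numbers[s:s+l]
--     if len(sr) == l and isComfy(numbers[s:s+l]):
--       return True
--   return False
-- ===== SOURCE B (Python) =====
-- def isComfortable(numbers, i, l):
--     # prefix sums over just the covering segment: each window sum in O(1)
--     if l == 1:
--         return True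
--     n = len(numbers)
--     lo = max(0, i - l + 1)
--     hi = min(i, n - l)
--     if hi < lo:
--         return False
--     prefix = [0]
--     acc = 0
--     for x in numbers[lo:hi + l]:
--         acc += x
--         prefix.append(acc)
--     for s in range(lo, hi + 1):
--         if (prefix[s + l - lo] - prefix[s - lo]) % l == 0:
--             return True
--     return False
-- ===== Notes on version B (the rewrite author's own statement) =====
-- stated objective: faster
-- what changed: B precomputes a prefix-sum array once and tests each window sum by O(1) subtraction over the exact valid start range, instead of A's re-slicing and re-summing a length-l sublist for every candidate start.
import Mathlib
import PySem

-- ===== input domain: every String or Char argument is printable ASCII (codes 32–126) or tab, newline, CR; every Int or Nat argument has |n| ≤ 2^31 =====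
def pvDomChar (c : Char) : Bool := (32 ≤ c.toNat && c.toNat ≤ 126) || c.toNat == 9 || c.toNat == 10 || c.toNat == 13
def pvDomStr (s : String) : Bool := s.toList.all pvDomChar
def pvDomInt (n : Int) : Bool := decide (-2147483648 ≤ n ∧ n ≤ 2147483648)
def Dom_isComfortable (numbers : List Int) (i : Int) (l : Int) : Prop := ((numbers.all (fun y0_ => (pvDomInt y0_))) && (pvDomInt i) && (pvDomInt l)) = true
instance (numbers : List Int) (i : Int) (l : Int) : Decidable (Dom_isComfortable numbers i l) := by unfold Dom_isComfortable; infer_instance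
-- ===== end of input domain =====

-- B replaces A's per-start slice-and-resum (O(l) work per candidate start) by a prefix-sum
-- array with O(1) window sums over the exact valid start range; objective: faster.

-- ===== PORT A =====
def isComfy (numbers : List Int) : Bool :=
  PySem.Int.mod numbers.sum (numbers.length : Int) == 0

-- 'nl = len(numbers)' in A is computed but never used
def isComfortable (numbers : List Int) (i : Int) (l : Int) : Bool :=
  if l == 1 then true
  else
    let si := max 0 (i - l + 1)
    (PySem.List.pyRange si (i + 1) 1).any (fun s =>
      (((PySem.List.slice numbers (some s) (some (s + l))).length : Int) == l)
        && isComfy (PySem.List.slice numbers (some s) (some (s + l))))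

-- ===== PORT B =====
def isComfortable_alt (numbers : List Int) (i : Int) (l : Int) : Bool :=
  if l == 1 then true
  else
    let n : Int := numbers.length
    let lo := max 0 (i - l + 1)
    let hi := min i (n - l)
    if hi < lo then false
    else
      let pa := (PySem.List.slice numbers (some lo) (some (hi + l))).foldl
        (fun (st : List Int × Int) x => (st.1 ++ [st.2 + x], st.2 + x)) ([0], 0)
      (PySem.List.pyRange lo (hi + 1) 1).any (fun s =>
        PySem.Int.mod (PySem.List.pyGetD pa.1 (s + l - lo) 0 - PySem.List.pyGetD pa.1 (s - lo) 0) l == 0)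

-- ===== PRECONDITION & SPEC =====
def Spec_isComfortable (numbers : List Int) (i : Int) (l : Int) (out : Bool) : Prop := out = isComfortable_alt numbers i l
instance (numbers : List Int) (i : Int) (l : Int) (out : Bool) : Decidable (Spec_isComfortable numbers i l out) := by unfold Spec_isComfortable; infer_instance

-- ===== CLAIM (what is proved, stated in full; the proofs are below) =====
def Claim_equal_isComfortable : Prop := ∀ (numbers : List Int) (i : Int) (l : Int), Dom_isComfortable numbers i l → Spec_isComfortable numbers i l (isComfortable numbers i l)

-- ===== LEMMAS AND PROOFS =====

lemma foldl_prefix (xs : List Int) : ∀ (p : List Int) (a : Int),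
    List.foldl (fun (st : List Int × Int) x => (st.1 ++ [st.2 + x], st.2 + x)) (p, a) xs
      = (p ++ (List.range xs.length).map (fun k => a + (xs.take (k + 1)).sum), a + xs.sum) := by
  induction xs with
  | nil => intro p a; simp
  | cons x t ih =>
    intro p a
    rw [List.foldl_cons, ih]
    refine Prod.ext ?_ (by simp; ring)
    simp [List.range_succ_eq_map, List.map_map, Function.comp, List.append_assoc]
    intro k _; ring

lemma sum_drop_take (xs : List Int) (a m : Nat) :
    ((xs.drop a).take m).sum = (xs.take (a + m)).sum - (xs.take a).sum := by
  rw [List.take_add, List.sum_append]; ring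

lemma prefix_get (xs : List Int) (k : Int) (h0 : 0 ≤ k) (h1 : k ≤ (xs.length : Int)) :
    PySem.List.pyGetD (List.foldl (fun (st : List Int × Int) x => (st.1 ++ [st.2 + x], st.2 + x)) ([0], 0) xs).1 k 0
      = (xs.take k.toNat).sum := by
  rw [foldl_prefix]
  dsimp only
  rw [PySem.List.pyGetD_of_nonneg _ _ h0]
  cases hk : k.toNat with
  | zero => simp
  | succ m =>
    have hm : m < xs.length := by omega
    simp only [List.cons_append, List.nil_append, List.getD_cons_succ]
    rw [List.getD_eq_getElem _ _ (by simpa using hm)]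
    simp [hm]

-- prefix sums of the segment numbers[lo:b] give differences of full prefix sums
lemma seg_prefix_get (xs : List Int) (lo b k : Int) (h0 : 0 ≤ lo) (hk : 0 ≤ k)
    (hkb : lo + k ≤ b) (hbn : b ≤ (xs.length : Int)) :
    PySem.List.pyGetD ((PySem.List.slice xs (some lo) (some b)).foldl
        (fun (st : List Int × Int) x => (st.1 ++ [st.2 + x], st.2 + x)) ([0], 0)).1 k 0
      = (xs.take (lo + k).toNat).sum - (xs.take lo.toNat).sum := by
  rw [PySem.List.slice_toNat _ h0 (by omega)]
  have hseglen : (List.take (b.toNat - lo.toNat) (List.drop lo.toNat xs)).length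
      = b.toNat - lo.toNat := by
    simp [List.length_take, List.length_drop]; omega
  rw [prefix_get _ _ hk (by rw [hseglen]; omega)]
  rw [List.take_take]
  have : min k.toNat (b.toNat - lo.toNat) = k.toNat := by omega
  rw [this, sum_drop_take]
  have h2 : lo.toNat + k.toNat = (lo + k).toNat := by omega
  rw [h2]

theorem main_eq (numbers : List Int) (i l : Int) :
    isComfortable numbers i l = isComfortable_alt numbers i l := by
  unfold isComfortable isComfortable_alt
  by_cases h1 : l = 1
  · simp [h1]
  · have hne : (l == 1) = false := by simp [h1]
    simp only [hne, Bool.false_eq_true, if_false]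
    by_cases hempty : min i ((numbers.length : Int) - l) < max 0 (i - l + 1)
    · -- B returns false; A's surviving candidates all fail the length test
      rw [if_pos hempty, List.any_eq_false]
      intro s hs
      rw [PySem.List.mem_pyRange_one] at hs
      obtain ⟨hs1, hs2⟩ := hs
      have hs0 : 0 ≤ s := le_trans (le_max_left _ _) hs1
      rcases (by omega : l ≤ 0 ∨ 2 ≤ l) with hl | hl
      · -- range(si, i+1) is empty when l ≤ 0; contradiction
        omega
      · simp only [Bool.and_eq_true, beq_iff_eq, not_and]
        intro hlen
        exfalso
        rw [PySem.List.slice_toNat _ hs0 (by omega)] at hlen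
        have : (List.take ((s + l).toNat - s.toNat) (List.drop s.toNat numbers)).length
            = min ((s + l).toNat - s.toNat) (numbers.length - s.toNat) := by
          simp [List.length_take, List.length_drop]
        omega
    · rw [if_neg hempty]
      rw [not_lt] at hempty
      have hl : 2 ≤ l := by
        rcases (by omega : l ≤ 0 ∨ 2 ≤ l) with hl0 | hl2
        · exfalso
          have hn : (0:Int) ≤ (numbers.length : Int) := by positivity
          omega
        · exact hl2
      rw [Bool.eq_iff_iff]
      simp only [List.any_eq_true, PySem.List.mem_pyRange_one]
      constructor
      · rintro ⟨s, ⟨hs1, hs2⟩, hf⟩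
        have hs0 : 0 ≤ s := le_trans (le_max_left _ _) hs1
        rw [PySem.List.slice_toNat _ hs0 (by omega)] at hf
        have htn : (s + l).toNat - s.toNat = l.toNat := by omega
        rw [htn] at hf
        simp only [Bool.and_eq_true, beq_iff_eq] at hf
        obtain ⟨hlen, hcomfy⟩ := hf
        have hlen' : (List.take l.toNat (List.drop s.toNat numbers)).length = l.toNat := by
          omega
        have hbound : s.toNat + l.toNat ≤ numbers.length := by
          simp [List.length_take, List.length_drop] at hlen'
          omega
        refine ⟨s, ⟨hs1, by omega⟩, ?_⟩
        unfold isComfy at hcomfy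
        rw [seg_prefix_get _ _ _ _ (by omega) (by omega) (by omega) (by omega),
            seg_prefix_get _ _ _ _ (by omega) (by omega) (by omega) (by omega)]
        have h2 : max 0 (i - l + 1) + (s + l - max 0 (i - l + 1)) = s + l := by ring
        have h3 : max 0 (i - l + 1) + (s - max 0 (i - l + 1)) = s := by ring
        rw [h2, h3]
        have hto : (s + l).toNat = s.toNat + l.toNat := by omega
        have hsum : (List.take l.toNat (List.drop s.toNat numbers)).sum
            = (numbers.take (s + l).toNat).sum - (numbers.take s.toNat).sum := by
          rw [sum_drop_take, ← hto]
        rw [hlen', Int.toNat_of_nonneg (by omega : (0:Int) ≤ l), hsum] at hcomfy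
        have hring : (numbers.take (s + l).toNat).sum - (numbers.take (max 0 (i - l + 1)).toNat).sum
            - ((numbers.take s.toNat).sum - (numbers.take (max 0 (i - l + 1)).toNat).sum)
            = (numbers.take (s + l).toNat).sum - (numbers.take s.toNat).sum := by ring
        rw [hring]
        exact hcomfy
      · rintro ⟨s, ⟨hs1, hs2⟩, hg⟩
        have hs0 : 0 ≤ s := le_trans (le_max_left _ _) hs1
        have hbound : s + l ≤ (numbers.length : Int) := by omega
        refine ⟨s, ⟨hs1, by omega⟩, ?_⟩
        rw [seg_prefix_get _ _ _ _ (by omega) (by omega) (by omega) (by omega),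
            seg_prefix_get _ _ _ _ (by omega) (by omega) (by omega) (by omega)] at hg
        have h2 : max 0 (i - l + 1) + (s + l - max 0 (i - l + 1)) = s + l := by ring
        have h3 : max 0 (i - l + 1) + (s - max 0 (i - l + 1)) = s := by ring
        rw [h2, h3] at hg
        have hring : (numbers.take (s + l).toNat).sum - (numbers.take (max 0 (i - l + 1)).toNat).sum
            - ((numbers.take s.toNat).sum - (numbers.take (max 0 (i - l + 1)).toNat).sum)
            = (numbers.take (s + l).toNat).sum - (numbers.take s.toNat).sum := by ring
        rw [hring] at hg
        rw [PySem.List.slice_toNat _ hs0 (by omega)]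
        have htn2 : (s + l).toNat - s.toNat = l.toNat := by omega
        rw [htn2]
        have hlen' : (List.take l.toNat (List.drop s.toNat numbers)).length = l.toNat := by
          simp [List.length_take, List.length_drop]; omega
        have hto : (s + l).toNat = s.toNat + l.toNat := by omega
        have hsum : (List.take l.toNat (List.drop s.toNat numbers)).sum
            = (numbers.take (s + l).toNat).sum - (numbers.take s.toNat).sum := by
          rw [sum_drop_take, ← hto]
        unfold isComfy
        simp only [Bool.and_eq_true, beq_iff_eq]
        rw [hlen', Int.toNat_of_nonneg (by omega : (0:Int) ≤ l), hsum]
        exact ⟨rfl, by simpa using hg⟩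

-- ===== VERDICT (by name: the statement is the Claim_ definition above) =====
theorem isComfortable_spec : Claim_equal_isComfortable := by
  intro numbers i l _
  unfold Spec_isComfortable
  exact main_eq numbers i l
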